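-- pv_equiv track=rewrite | github.com/aless57/security_crypto_project | question6.py | RANDU
-- ===== SOURCE A (Python) =====
-- import math
--
-- def RANDU(graine,nbMax):
--     a = 65539
--     b = 0
--     m = int(math.pow(2,31))
--     tab = [graine]
--     for t in range(0,nbMax-1):
--         graine = (a*graine+b) % m
--         tab.append(graine)
--     return tab
-- ===== SOURCE B (Python) =====
-- def RANDU(graine, nbMax):
--     a = 65539
--     m = 2 ** 31
--     return [graine] + [graine * pow(a, t, m) % m for t in range(1, nbMax)]
-- ===== Notes on version B (the rewrite author's own statement) =====
-- stated objective: alternative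
-- what changed: Replaces the sequential state-carrying LCG recurrence (b=0) with independent closed-form terms graine*a^t mod m computed by modular exponentiation per index.
import Mathlib
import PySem

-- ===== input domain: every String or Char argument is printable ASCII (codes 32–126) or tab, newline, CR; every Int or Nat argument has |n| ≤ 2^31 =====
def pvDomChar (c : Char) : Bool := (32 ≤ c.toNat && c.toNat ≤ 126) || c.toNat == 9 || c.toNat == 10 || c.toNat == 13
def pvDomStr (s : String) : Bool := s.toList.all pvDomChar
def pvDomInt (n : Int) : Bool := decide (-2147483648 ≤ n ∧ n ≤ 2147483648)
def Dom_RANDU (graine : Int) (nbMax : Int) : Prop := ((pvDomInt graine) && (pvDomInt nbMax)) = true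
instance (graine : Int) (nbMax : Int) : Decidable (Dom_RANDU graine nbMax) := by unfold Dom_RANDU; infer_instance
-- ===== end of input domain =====

-- B computes each term by the closed form graine * a^t mod m (b = 0 makes the LCG geometric)
-- instead of A's sequential state-carrying recurrence; alternative decomposition, same results.


-- ===== PORT A =====
def RANDU (graine : Int) (nbMax : Int) : List Int :=
  let a : Int := 65539
  let b : Int := 0
  let m : Int := 2 ^ 31
  let st := (PySem.List.pyRange 0 (nbMax - 1) 1).foldl
    (fun (st : Int × List Int) _ =>
      let g := PySem.Int.mod (a * st.1 + b) m
      (g, st.2 ++ [g]))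
    (graine, [graine])
  st.2

-- ===== PORT B =====
def RANDU_alt (graine : Int) (nbMax : Int) : List Int :=
  let a : Int := 65539
  let m : Int := 2 ^ 31
  graine :: (PySem.List.pyRange 1 nbMax 1).map
    (fun t => PySem.Int.mod (graine * PySem.Int.powMod a t.toNat m) m)

-- ===== PRECONDITION & SPEC =====
def Spec_RANDU (graine : Int) (nbMax : Int) (out : List Int) : Prop := out = RANDU_alt graine nbMax
instance (graine : Int) (nbMax : Int) (out : List Int) : Decidable (Spec_RANDU graine nbMax out) := by unfold Spec_RANDU; infer_instance

-- ===== CLAIM (what is proved, stated in full; the proofs are below) =====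
def Claim_equal_RANDU : Prop := ∀ (graine : Int) (nbMax : Int), Dom_RANDU graine nbMax → Spec_RANDU graine nbMax (RANDU graine nbMax)

-- ===== LEMMAS AND PROOFS =====

-- value of the state after k fold steps
def pvState (g : Int) (k : Nat) : Int :=
  if k = 0 then g else PySem.Int.mod (g * 65539 ^ k) (2 ^ 31)

lemma pvMod_eq_emod (x : Int) : PySem.Int.mod x (2 ^ 31) = x % (2 ^ 31) :=
  PySem.Int.mod_eq_emod_of_pos (by norm_num)

lemma pvStep (g : Int) (k : Nat) :
    PySem.Int.mod (65539 * pvState g k + 0) (2 ^ 31) = pvState g (k + 1) := by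
  unfold pvState
  rcases Nat.eq_zero_or_pos k with hk | hk
  · subst hk; simp; ring_nf
  · simp only [Nat.pos_iff_ne_zero.mp hk, Nat.succ_ne_zero, if_false, pvMod_eq_emod,
      add_zero]
    rw [Int.mul_emod, Int.emod_emod_of_dvd _ (dvd_refl _), ← Int.mul_emod]
    ring_nf

lemma pvClosed (g : Int) (k : Nat) :
    PySem.Int.mod (g * PySem.Int.mod (65539 ^ (k + 1)) (2 ^ 31)) (2 ^ 31)
      = pvState g (k + 1) := by
  unfold pvState
  simp only [Nat.succ_ne_zero, if_false, pvMod_eq_emod]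
  rw [Int.mul_emod, Int.emod_emod_of_dvd _ (dvd_refl _), ← Int.mul_emod]

lemma pvFold (g : Int) (N : Nat) :
    (List.range N).foldl
      (fun (st : Int × List Int) (_ : Nat) =>
        (PySem.Int.mod (65539 * st.1 + 0) (2 ^ 31),
         st.2 ++ [PySem.Int.mod (65539 * st.1 + 0) (2 ^ 31)]))
      (g, [g])
    = (pvState g N,
       g :: (List.range N).map
         (fun k => PySem.Int.mod (g * PySem.Int.mod (65539 ^ (k + 1)) (2 ^ 31)) (2 ^ 31))) := by
  induction N with
  | zero => simp [pvState]
  | succ n ih =>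
      rw [List.range_succ, List.foldl_append, ih]
      simp only [List.foldl_cons, List.foldl_nil, List.map_append, List.map_cons, List.map_nil]
      rw [pvStep, pvClosed]
      simp

theorem RANDU_spec : Claim_equal_RANDU := by
  intro g n _
  unfold Spec_RANDU RANDU RANDU_alt
  simp only []
  rw [PySem.List.pyRange_one 0 (n - 1), PySem.List.pyRange_one 1 n, List.foldl_map,
    List.map_map]
  have hlen : (n - 1 - 0).toNat = (n - 1).toNat := by norm_num
  rw [hlen]
  rw [pvFold g ((n - 1).toNat)]
  dsimp only
  congr 1
  apply List.map_congr_left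
  intro k hk
  have h1 : ((1 : Int) + k).toNat = k + 1 := by omega
  simp only [Function.comp_apply, h1, PySem.Int.powMod]
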